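-- pv_equiv track=rewrite | github.com/Djara2/dconsole-python | dtools.py | handleSpecialChars
-- ===== SOURCE A (Python) =====
-- def handleSpecialChars(workingList, specialChars):
--     for x in range(0, len(workingList)):
--         if workingList[x] in specialChars:
--             if workingList[x] == "vec":
--                 workingList[x] = "\\vec{"
--                 workingList[x+1] += "}"
--             elif workingList[x] == "delta" or workingList[x] == "dd":
--                 workingList[x] = "\\Delta "
--             elif workingList[x] == "alpha" or workingList[x] == "aa":
--                 workingList[x] = "\\alpha "
--             elif workingList[x] == "omega" or workingList[x] == "oo":
--                 workingList[x] = "\\omega "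
--             elif workingList[x] == "right" or workingList[x] == "rr":
--                 workingList[x] == "\\Rightarrow "
--             elif workingList[x] == "left" or workingList[x] == "ll":
--                 workingList[x] = "\\Leftarrow "
--
--             elif workingList[x] == "in" or workingList[x] == "member" or workingList[x] == "mem":
--                 workingList[x] = "\\in"
--
--             elif workingList[x] == "neq" or workingList[x] == "notequal" or workingList[x] == "!=":
--                 workingList[x] = "\\neq"
--
--             elif workingList[x] == "notin" or workingList[x] == "notmem" or workingList[x] == "notmember":
--                 workingList[x] = "\\notin"
--
--             elif workingList[x] == "porm" or workingList[x] == "plusorminus" or workingList[x] == "pm" or workingList[x] == "+-":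
--                 workingList[x] = "\\pm"
--
--
--             elif workingList[x] == "notlessthan" or workingList[x] == "notless" or workingList[x] == "nless" or workingList[x] == "!<":
--                 workingList[x] = "\\nless"
--
--             elif workingList[x] == "!>" or workingList[x] == "notgreaterthan" or workingList[x] == "notgreater" or workingList[x] == "ngreater":
--                 workingList[x] == "\\ngtr"
--
--             elif workingList[x] == "!>=":
--                 workingList[x] = "\\ngeq"
--
--             elif workingList[x] == "!<=":
--                 workingList[x] = "\\nleq"
--
--             elif workingList[x] == "<=" or workingList[x] == "leq" or workingList[x] == "lessthanorqualto" or workingList[x] == "lessequal" or workingList[x] == "lessthanequal" or workingList[x] == "lessequalto":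
--                 workingList[x] = "\\leq"
--
--             elif workingList[x] == ">=" or workingList[x] == "geq" or workingList[x] == "greaterorequal" or workingList[x] == "greaterthanorrequalto" or workingList[x] == "greaterthanequalto" or workingList[x] == "greaterequal":
--                 workingList[x] = "\\geq"
--
--             elif workingList[x] == "abt" or workingList[x] == "approx" or workingList[x] == "about":
--                  workingList[x] = "\\approx"
--
--             elif workingList[x] == "subset" or workingList[x] == "sub":
--                 workingList[x] = "\\subset"
--
--             elif workingList[x] == "notsubset" or workingList[x] == "nsubset" or workingList[x] == "notsub" or workingList[x] == "nsub" or workingList[x] == "!sub":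
--                 workingList[x] = "\\not\\subset"
--
--             elif workingList[x] == "real":
--                 workingList[x] = "\\R"
--
--             elif workingList[x] == "ints":
--                 workingList[x] = "\\Z"
--
--             elif workingList[x] == "natural":
--                 workingList[x] = "\\N"
--
--             else:
--                 pass
--         else:
--             next
--     return(workingList)
-- ===== SOURCE B (Python) =====
-- # Rebuilds the list in a fresh output list, consuming the pair ("vec", next)
-- # from an iterator in one step, instead of A's index loop with in-place
-- # assignment and revisit of the mangled successor; a dict maps
-- # every other alias to its LaTeX string, and the six alias tokens whose branch
-- # in A is a no-op `==` typo (right/rr/!>/notgreaterthan/notgreater/ngreater)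
-- # are translated as intended (see the stated difference). The caller-visible
-- # mutation of workingList is preserved via slice assignment.
-- #
-- # Correctness of the pair-consumption: after A rewrites position x to "\\vec{"
-- # and appends "}" to position x+1, the loop still visits x+1, but its value now
-- # ends in "}" and therefore equals no alias token (none ends in "}"), so that
-- # visit is a no-op; skipping it is exact.
--
-- LATEX = {
--     "delta": "\\Delta ", "dd": "\\Delta ",
--     "alpha": "\\alpha ", "aa": "\\alpha ",
--     "omega": "\\omega ", "oo": "\\omega ",
--     "right": "\\Rightarrow ", "rr": "\\Rightarrow ",
--     "left": "\\Leftarrow ", "ll": "\\Leftarrow ",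
--     "in": "\\in", "member": "\\in", "mem": "\\in",
--     "neq": "\\neq", "notequal": "\\neq", "!=": "\\neq",
--     "notin": "\\notin", "notmem": "\\notin", "notmember": "\\notin",
--     "porm": "\\pm", "plusorminus": "\\pm", "pm": "\\pm", "+-": "\\pm",
--     "notlessthan": "\\nless", "notless": "\\nless", "nless": "\\nless", "!<": "\\nless",
--     "!>": "\\ngtr", "notgreaterthan": "\\ngtr", "notgreater": "\\ngtr", "ngreater": "\\ngtr",
--     "!>=": "\\ngeq",
--     "!<=": "\\nleq",
--     "<=": "\\leq", "leq": "\\leq", "lessthanorqualto": "\\leq", "lessequal": "\\leq",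
--     "lessthanequal": "\\leq", "lessequalto": "\\leq",
--     ">=": "\\geq", "geq": "\\geq", "greaterorequal": "\\geq", "greaterthanorrequalto": "\\geq",
--     "greaterthanequalto": "\\geq", "greaterequal": "\\geq",
--     "abt": "\\approx", "approx": "\\approx", "about": "\\approx",
--     "subset": "\\subset", "sub": "\\subset",
--     "notsubset": "\\not\\subset", "nsubset": "\\not\\subset", "notsub": "\\not\\subset",
--     "nsub": "\\not\\subset", "!sub": "\\not\\subset",
--     "real": "\\R",
--     "ints": "\\Z",
--     "natural": "\\N",
-- }
--
--
-- def handleSpecialChars(workingList, specialChars):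
--     out = []
--     it = iter(workingList)
--     for token in it:
--         if token in specialChars:
--             if token == "vec":
--                 out.append("\\vec{")
--                 out.append(next(it) + "}")  # like A, a trailing "vec" raises (StopIteration vs A's IndexError)
--                 continue
--             if token in LATEX:
--                 out.append(LATEX[token])
--                 continue
--         out.append(token)
--     workingList[:] = out
--     return workingList
-- ===== Notes on version B (the rewrite author's own statement) =====
-- stated objective: alternative
-- what changed: Replaces A's index loop with in-place assignment and a 25-branch if/elif chain by a single pass that builds a fresh list from an iterator, consuming the pair (vec, successor) in one step instead of revisiting the mangled successor, with a module-level token-to-LaTeX dict; the '==' (comparison instead of assignment) no-op branches are translated as intended.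
-- intended difference: On lists containing one of right/rr/!>/notgreaterthan/notgreater/ngreater that is also in specialChars (and not mangled by a preceding vec), A leaves the token unchanged because its branch uses '==' instead of '=' (a no-op comparison), while B replaces it with '\Rightarrow ' resp. '\ngtr' as every neighbouring branch intends. — e.g. on handleSpecialChars(["right"], ["right"]): A returns ["right"], B returns ["\\Rightarrow "]
import Mathlib
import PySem

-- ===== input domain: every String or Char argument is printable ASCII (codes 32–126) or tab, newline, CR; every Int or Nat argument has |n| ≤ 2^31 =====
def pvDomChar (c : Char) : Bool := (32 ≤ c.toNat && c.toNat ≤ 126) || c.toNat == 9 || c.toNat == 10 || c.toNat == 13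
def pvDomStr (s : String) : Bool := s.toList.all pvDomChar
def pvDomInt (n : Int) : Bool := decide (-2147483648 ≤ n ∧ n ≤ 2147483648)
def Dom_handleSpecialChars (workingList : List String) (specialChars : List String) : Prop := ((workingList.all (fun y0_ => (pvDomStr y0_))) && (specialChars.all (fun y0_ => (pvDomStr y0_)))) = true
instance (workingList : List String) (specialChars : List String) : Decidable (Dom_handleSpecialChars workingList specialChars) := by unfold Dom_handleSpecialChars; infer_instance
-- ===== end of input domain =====

-- B builds a fresh list in one pass, consuming the pair (vec, successor) from the input in a single step, with a token→LaTeX dict, instead of A's index loop with in-place assignment and a 25-branch if/elif chain; B fixes the `==` no-op branches (see D_ below); equivalence is about the return value (both Pythons mutate workingList in place).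


-- ===== PORT A =====
-- Port of A. Python mutates workingList in place and returns it; the port returns the
-- final list value (the equivalence claimed is about the return value).
-- List indices x from range(0, len) are nonnegative, so Nat indexing is exact there;
-- `workingList[x+1] += "}"` raises IndexError when x+1 = len — those inputs are excluded
-- by Pre_handleSpecialChars (List.set out of range is a no-op, never reached inside Pre_).
def pvChainA (l : List String) (x : Nat) (t : String) : List String :=
  if t == "delta" || t == "dd" then l.set x "\\Delta "
  else if t == "alpha" || t == "aa" then l.set x "\\alpha "
  else if t == "omega" || t == "oo" then l.set x "\\omega "
  else if t == "right" || t == "rr" then l  -- original: `workingList[x] == "…"` — a comparison, not an assignment (no-op)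
  else if t == "left" || t == "ll" then l.set x "\\Leftarrow "
  else if t == "in" || t == "member" || t == "mem" then l.set x "\\in"
  else if t == "neq" || t == "notequal" || t == "!=" then l.set x "\\neq"
  else if t == "notin" || t == "notmem" || t == "notmember" then l.set x "\\notin"
  else if t == "porm" || t == "plusorminus" || t == "pm" || t == "+-" then l.set x "\\pm"
  else if t == "notlessthan" || t == "notless" || t == "nless" || t == "!<" then l.set x "\\nless"
  else if t == "!>" || t == "notgreaterthan" || t == "notgreater" || t == "ngreater" then l  -- original: `workingList[x] == "…"` — a comparison, not an assignment (no-op)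
  else if t == "!>=" then l.set x "\\ngeq"
  else if t == "!<=" then l.set x "\\nleq"
  else if t == "<=" || t == "leq" || t == "lessthanorqualto" || t == "lessequal" || t == "lessthanequal" || t == "lessequalto" then l.set x "\\leq"
  else if t == ">=" || t == "geq" || t == "greaterorequal" || t == "greaterthanorrequalto" || t == "greaterthanequalto" || t == "greaterequal" then l.set x "\\geq"
  else if t == "abt" || t == "approx" || t == "about" then l.set x "\\approx"
  else if t == "subset" || t == "sub" then l.set x "\\subset"
  else if t == "notsubset" || t == "nsubset" || t == "notsub" || t == "nsub" || t == "!sub" then l.set x "\\not\\subset"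
  else if t == "real" then l.set x "\\R"
  else if t == "ints" then l.set x "\\Z"
  else if t == "natural" then l.set x "\\N"
  else l  -- `else: pass`

def pvStepA (specialChars : List String) (l : List String) (x : Nat) : List String :=
  let t := l.getD x ""
  if specialChars.contains t then
    if t == "vec" then
      let l' := l.set x "\\vec{"
      l'.set (x+1) (l'.getD (x+1) "" ++ "}")
    else pvChainA l x t
  else l  -- `else: next`

def handleSpecialChars (workingList : List String) (specialChars : List String) : List String :=
  (List.range workingList.length).foldl (pvStepA specialChars) workingList

-- ===== PORT B =====
-- B's module-level dict LATEX (insertion order, unique keys).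
def pvLatexTable : PySem.Dict String String := PySem.Dict.mk [
  ("delta", "\\Delta "),
  ("dd", "\\Delta "),
  ("alpha", "\\alpha "),
  ("aa", "\\alpha "),
  ("omega", "\\omega "),
  ("oo", "\\omega "),
  ("right", "\\Rightarrow "),
  ("rr", "\\Rightarrow "),
  ("left", "\\Leftarrow "),
  ("ll", "\\Leftarrow "),
  ("in", "\\in"),
  ("member", "\\in"),
  ("mem", "\\in"),
  ("neq", "\\neq"),
  ("notequal", "\\neq"),
  ("!=", "\\neq"),
  ("notin", "\\notin"),
  ("notmem", "\\notin"),
  ("notmember", "\\notin"),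
  ("porm", "\\pm"),
  ("plusorminus", "\\pm"),
  ("pm", "\\pm"),
  ("+-", "\\pm"),
  ("notlessthan", "\\nless"),
  ("notless", "\\nless"),
  ("nless", "\\nless"),
  ("!<", "\\nless"),
  ("!>", "\\ngtr"),
  ("notgreaterthan", "\\ngtr"),
  ("notgreater", "\\ngtr"),
  ("ngreater", "\\ngtr"),
  ("!>=", "\\ngeq"),
  ("!<=", "\\nleq"),
  ("<=", "\\leq"),
  ("leq", "\\leq"),
  ("lessthanorqualto", "\\leq"),
  ("lessequal", "\\leq"),
  ("lessthanequal", "\\leq"),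
  ("lessequalto", "\\leq"),
  (">=", "\\geq"),
  ("geq", "\\geq"),
  ("greaterorequal", "\\geq"),
  ("greaterthanorrequalto", "\\geq"),
  ("greaterthanequalto", "\\geq"),
  ("greaterequal", "\\geq"),
  ("abt", "\\approx"),
  ("approx", "\\approx"),
  ("about", "\\approx"),
  ("subset", "\\subset"),
  ("sub", "\\subset"),
  ("notsubset", "\\not\\subset"),
  ("nsubset", "\\not\\subset"),
  ("notsub", "\\not\\subset"),
  ("nsub", "\\not\\subset"),
  ("!sub", "\\not\\subset"),
  ("real", "\\R"),
  ("ints", "\\Z"),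
  ("natural", "\\N")]

-- B's loop over the iterator, as structural recursion on the remaining tokens: each
-- iteration consumes the head, and a "vec" in specialChars consumes its successor too
-- (`next(it)`). Python raises StopIteration when a "vec" is last — excluded by
-- Pre_handleSpecialChars; the port emits just "\\vec{" there.
def pvConvert (sc : List String) : List String → List String
  | [] => []
  | h :: rest =>
    if sc.contains h then
      if h == "vec" then
        match rest with
        | [] => ["\\vec{"]
        | y :: rest' => "\\vec{" :: (y ++ "}") :: pvConvert sc rest'
      else
        match pvLatexTable.get? h with
        | some r => r :: pvConvert sc rest
        | none => h :: pvConvert sc rest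
    else h :: pvConvert sc rest

def handleSpecialChars_alt (workingList : List String) (specialChars : List String) : List String :=
  pvConvert specialChars workingList

-- ===== PRECONDITION & SPEC =====
-- A (and B) raise IndexError exactly when "vec" ∈ specialChars and the maximal trailing
-- run of "vec" tokens in workingList has odd length (then the last element becomes "\vec{"
-- and the read of the following element is out of range); Pre_ excludes exactly those.
def Pre_handleSpecialChars (workingList : List String) (specialChars : List String) : Prop :=
  ¬ ("vec" ∈ specialChars ∧ (workingList.reverse.takeWhile (· == "vec")).length % 2 = 1)
instance (workingList : List String) (specialChars : List String) : Decidable (Pre_handleSpecialChars workingList specialChars) := by unfold Pre_handleSpecialChars; infer_instance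
def pvWitness_handleSpecialChars : List String × List String := (["delta", "x"], ["delta"])

-- length of the maximal run of "vec" tokens immediately before position k (input-only helper for D_)
def pvRun (wl : List String) (k : Nat) : Nat := ((wl.take k).reverse.takeWhile (fun s => s == "vec")).length
-- position k's token has already been turned into token ++ "}" by the time the loop reaches it
-- (the loop processes a "vec" at every second position of a "vec" run)
def pvShadowB (sc : List String) (wl : List String) (k : Nat) : Bool :=
  sc.contains "vec" && pvRun wl k % 2 == 1

-- On lists with a token right/rr/!>/notgreaterthan/notgreater/ngreater that is in specialChars
-- and is not already mangled by a preceding "vec" replacement, A leaves the token unchanged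
-- (its branch says `==` instead of `=`, a no-op comparison), while B replaces it with
-- "\Rightarrow " resp. "\ngtr" as intended.
def D_handleSpecialChars (workingList : List String) (specialChars : List String) : Prop :=
  ∃ x < workingList.length,
    workingList.getD x "" ∈ (["right", "rr", "!>", "notgreaterthan", "notgreater", "ngreater"] : List String) ∧
    workingList.getD x "" ∈ specialChars ∧
    pvShadowB specialChars workingList x = false
instance (workingList : List String) (specialChars : List String) : Decidable (D_handleSpecialChars workingList specialChars) := by unfold D_handleSpecialChars; infer_instance

def Spec_handleSpecialChars (workingList : List String) (specialChars : List String) (out : List String) : Prop := ¬ D_handleSpecialChars workingList specialChars → out = handleSpecialChars_alt workingList specialChars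
instance (workingList : List String) (specialChars : List String) (out : List String) : Decidable (Spec_handleSpecialChars workingList specialChars out) := by unfold Spec_handleSpecialChars; infer_instance

def pvDiffWitness_handleSpecialChars : List String × List String := (["right"], ["right"])
def pvDiffWitnessOut_handleSpecialChars : (List String) × (List String) := (["right"], ["\\Rightarrow "])

-- ===== CLAIM (what is proved, stated in full; the proofs are below) =====
def Claim_unchanged_handleSpecialChars : Prop := ∀ (workingList : List String) (specialChars : List String), Dom_handleSpecialChars workingList specialChars → Pre_handleSpecialChars workingList specialChars → Spec_handleSpecialChars workingList specialChars (handleSpecialChars workingList specialChars)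
def Claim_changed_handleSpecialChars : Prop := Dom_handleSpecialChars (pvDiffWitness_handleSpecialChars.1) (pvDiffWitness_handleSpecialChars.2) ∧ Pre_handleSpecialChars (pvDiffWitness_handleSpecialChars.1) (pvDiffWitness_handleSpecialChars.2) ∧ D_handleSpecialChars (pvDiffWitness_handleSpecialChars.1) (pvDiffWitness_handleSpecialChars.2) ∧ handleSpecialChars (pvDiffWitness_handleSpecialChars.1) (pvDiffWitness_handleSpecialChars.2) = pvDiffWitnessOut_handleSpecialChars.1 ∧ handleSpecialChars_alt (pvDiffWitness_handleSpecialChars.1) (pvDiffWitness_handleSpecialChars.2) = pvDiffWitnessOut_handleSpecialChars.2 ∧ pvDiffWitnessOut_handleSpecialChars.1 ≠ pvDiffWitnessOut_handleSpecialChars.2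
def Claim_exact_handleSpecialChars : Prop := ∀ (workingList : List String) (specialChars : List String), Dom_handleSpecialChars workingList specialChars → Pre_handleSpecialChars workingList specialChars → D_handleSpecialChars workingList specialChars → handleSpecialChars workingList specialChars ≠ handleSpecialChars_alt workingList specialChars

-- ===== LEMMAS AND PROOFS =====
-- the tokens whose branch in A is the `==` no-op
def pvBad : List String := ["right", "rr", "!>", "notgreaterthan", "notgreater", "ngreater"]

-- the final value both programs put at position j (shared pointwise description)
def pvOut (sc wl : List String) (j : Nat) : String :=
  if pvShadowB sc wl j then wl.getD j "" ++ "}"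
  else if sc.contains (wl.getD j "") then
    if wl.getD j "" == "vec" then "\\vec{"
    else match pvLatexTable.get? (wl.getD j "") with
      | some r => r
      | none => wl.getD j ""
  else wl.getD j ""

-- A's if/elif chain agrees with B's dict lookup on every non-buggy token
theorem pvChain_eq_table (l : List String) (x : Nat) (t : String) (hb : t ∉ pvBad) :
    pvChainA l x t = (match pvLatexTable.get? t with | some r => l.set x r | none => l) := by
  by_cases h0 : t = "delta"
  · subst h0; rfl
  by_cases h1 : t = "dd"
  · subst h1; rfl
  by_cases h2 : t = "alpha"
  · subst h2; rfl
  by_cases h3 : t = "aa"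
  · subst h3; rfl
  by_cases h4 : t = "omega"
  · subst h4; rfl
  by_cases h5 : t = "oo"
  · subst h5; rfl
  by_cases h6 : t = "right"
  · subst h6; simp [pvBad] at hb
  by_cases h7 : t = "rr"
  · subst h7; simp [pvBad] at hb
  by_cases h8 : t = "left"
  · subst h8; rfl
  by_cases h9 : t = "ll"
  · subst h9; rfl
  by_cases h10 : t = "in"
  · subst h10; rfl
  by_cases h11 : t = "member"
  · subst h11; rfl
  by_cases h12 : t = "mem"
  · subst h12; rfl
  by_cases h13 : t = "neq"
  · subst h13; rfl
  by_cases h14 : t = "notequal"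
  · subst h14; rfl
  by_cases h15 : t = "!="
  · subst h15; rfl
  by_cases h16 : t = "notin"
  · subst h16; rfl
  by_cases h17 : t = "notmem"
  · subst h17; rfl
  by_cases h18 : t = "notmember"
  · subst h18; rfl
  by_cases h19 : t = "porm"
  · subst h19; rfl
  by_cases h20 : t = "plusorminus"
  · subst h20; rfl
  by_cases h21 : t = "pm"
  · subst h21; rfl
  by_cases h22 : t = "+-"
  · subst h22; rfl
  by_cases h23 : t = "notlessthan"
  · subst h23; rfl
  by_cases h24 : t = "notless"
  · subst h24; rfl
  by_cases h25 : t = "nless"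
  · subst h25; rfl
  by_cases h26 : t = "!<"
  · subst h26; rfl
  by_cases h27 : t = "!>"
  · subst h27; simp [pvBad] at hb
  by_cases h28 : t = "notgreaterthan"
  · subst h28; simp [pvBad] at hb
  by_cases h29 : t = "notgreater"
  · subst h29; simp [pvBad] at hb
  by_cases h30 : t = "ngreater"
  · subst h30; simp [pvBad] at hb
  by_cases h31 : t = "!>="
  · subst h31; rfl
  by_cases h32 : t = "!<="
  · subst h32; rfl
  by_cases h33 : t = "<="
  · subst h33; rfl
  by_cases h34 : t = "leq"
  · subst h34; rfl
  by_cases h35 : t = "lessthanorqualto"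
  · subst h35; rfl
  by_cases h36 : t = "lessequal"
  · subst h36; rfl
  by_cases h37 : t = "lessthanequal"
  · subst h37; rfl
  by_cases h38 : t = "lessequalto"
  · subst h38; rfl
  by_cases h39 : t = ">="
  · subst h39; rfl
  by_cases h40 : t = "geq"
  · subst h40; rfl
  by_cases h41 : t = "greaterorequal"
  · subst h41; rfl
  by_cases h42 : t = "greaterthanorrequalto"
  · subst h42; rfl
  by_cases h43 : t = "greaterthanequalto"
  · subst h43; rfl
  by_cases h44 : t = "greaterequal"
  · subst h44; rfl
  by_cases h45 : t = "abt"
  · subst h45; rfl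
  by_cases h46 : t = "approx"
  · subst h46; rfl
  by_cases h47 : t = "about"
  · subst h47; rfl
  by_cases h48 : t = "subset"
  · subst h48; rfl
  by_cases h49 : t = "sub"
  · subst h49; rfl
  by_cases h50 : t = "notsubset"
  · subst h50; rfl
  by_cases h51 : t = "nsubset"
  · subst h51; rfl
  by_cases h52 : t = "notsub"
  · subst h52; rfl
  by_cases h53 : t = "nsub"
  · subst h53; rfl
  by_cases h54 : t = "!sub"
  · subst h54; rfl
  by_cases h55 : t = "real"
  · subst h55; rfl
  by_cases h56 : t = "ints"
  · subst h56; rfl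
  by_cases h57 : t = "natural"
  · subst h57; rfl
  simp only [pvBad] at hb
  simp [pvChainA, pvLatexTable, PySem.Dict.get?_mk_cons,
    h0, h1, h2, h3, h4, h5, h6, h7, h8, h9, h10, h11, h12, h13, h14, h15, h16, h17, h18, h19, h20, h21, h22, h23, h24, h25, h26, h27, h28, h29, h30, h31, h32, h33, h34, h35, h36, h37, h38, h39, h40, h41, h42, h43, h44, h45, h46, h47, h48, h49, h50, h51, h52, h53, h54, h55, h56, h57,
    Ne.symm h0, Ne.symm h1, Ne.symm h2, Ne.symm h3, Ne.symm h4, Ne.symm h5, Ne.symm h6, Ne.symm h7, Ne.symm h8, Ne.symm h9, Ne.symm h10, Ne.symm h11, Ne.symm h12, Ne.symm h13, Ne.symm h14, Ne.symm h15, Ne.symm h16, Ne.symm h17, Ne.symm h18, Ne.symm h19, Ne.symm h20, Ne.symm h21, Ne.symm h22, Ne.symm h23, Ne.symm h24, Ne.symm h25, Ne.symm h26, Ne.symm h27, Ne.symm h28, Ne.symm h29, Ne.symm h30, Ne.symm h31, Ne.symm h32, Ne.symm h33, Ne.symm h34, Ne.symm h35, Ne.symm h36, Ne.symm h37, Ne.symm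 h38, Ne.symm h39, Ne.symm h40, Ne.symm h41, Ne.symm h42, Ne.symm h43, Ne.symm h44, Ne.symm h45, Ne.symm h46, Ne.symm h47, Ne.symm h48, Ne.symm h49, Ne.symm h50, Ne.symm h51, Ne.symm h52, Ne.symm h53, Ne.symm h54, Ne.symm h55, Ne.symm h56, Ne.symm h57]
  simp [PySem.Dict.get?, List.find?]

-- a token ending in "}" is never one of the buggy tokens, and never "vec"
theorem pvAppend_brace_not_bad (u : String) : (u ++ "}") ∉ pvBad := by
  intro hm
  have hL : (u ++ "}").toList.getLast? = some '}' := by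
    simp [String.toList_append]
  simp only [pvBad, List.mem_cons, List.not_mem_nil, or_false] at hm
  rcases hm with h | h | h | h | h | h <;> rw [h] at hL <;> exact absurd hL (by decide)

theorem pvAppend_brace_ne_vec (u : String) : (u ++ "}") ≠ "vec" := by
  intro h
  have hL : (u ++ "}").toList.getLast? = some '}' := by
    simp [String.toList_append]
  rw [h] at hL
  exact absurd hL (by decide)

-- no key of the table ends in "}": the dict never matches a brace-mangled token
theorem pvTable_get?_aux (key : String) (hk : key.toList.getLast? = some '}') :
    ∀ l : List (String × String), (∀ p ∈ l, p.1.toList.getLast? ≠ some '}') →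
      (PySem.Dict.mk l).get? key = none := by
  intro l
  induction l with
  | nil => intro _; rfl
  | cons p rest ih =>
    intro hl
    rw [PySem.Dict.get?_mk_cons]
    rw [if_neg (by
      intro hb
      exact hl p (by simp) ((eq_of_beq hb) ▸ hk))]
    exact ih (fun q hq => hl q (by simp [hq]))

theorem pvTable_get?_brace (u : String) : pvLatexTable.get? (u ++ "}") = none := by
  apply pvTable_get?_aux
  · simp [String.toList_append]
  · decide

theorem pvChainA_brace (l : List String) (x : Nat) (u : String) :
    pvChainA l x (u ++ "}") = l := by
  rw [pvChain_eq_table l x _ (pvAppend_brace_not_bad u), pvTable_get?_brace]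

-- A's chain is a no-op on the buggy tokens
theorem pvChainA_bad (l : List String) (x : Nat) (t : String) (h : t ∈ pvBad) :
    pvChainA l x t = l := by
  simp only [pvBad, List.mem_cons, List.not_mem_nil, or_false] at h
  rcases h with h | h | h | h | h | h <;> subst h <;> rfl

theorem pvBad_ne_vec (t : String) (h : t ∈ pvBad) : t ≠ "vec" := by
  simp only [pvBad, List.mem_cons, List.not_mem_nil, or_false] at h
  rcases h with h | h | h | h | h | h <;> subst h <;> decide

-- each loop step of A writes only positions x and x+1 and preserves the length
theorem pvChainA_getElem? (l : List String) (x : Nat) (t : String) (j : Nat) (hj : j ≠ x) :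
    (pvChainA l x t)[j]? = l[j]? := by
  by_cases hb : t ∈ pvBad
  · rw [pvChainA_bad l x t hb]
  · rw [pvChain_eq_table l x t hb]
    cases pvLatexTable.get? t with
    | none => rfl
    | some r => exact List.getElem?_set_ne (fun h => hj h.symm)

theorem pvChainA_length (l : List String) (x : Nat) (t : String) :
    (pvChainA l x t).length = l.length := by
  by_cases hb : t ∈ pvBad
  · rw [pvChainA_bad l x t hb]
  · rw [pvChain_eq_table l x t hb]
    cases pvLatexTable.get? t with
    | none => rfl
    | some r => exact List.length_set

theorem pvStepA_getElem? (sc l : List String) (x j : Nat) (h1 : j ≠ x) (h2 : j ≠ x + 1) :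
    (pvStepA sc l x)[j]? = l[j]? := by
  simp only [pvStepA]
  split
  · split
    · rw [List.getElem?_set_ne (fun h => h2 h.symm), List.getElem?_set_ne (fun h => h1 h.symm)]
    · exact pvChainA_getElem? l x _ j h1
  · rfl

theorem pvStepA_length (sc l : List String) (x : Nat) : (pvStepA sc l x).length = l.length := by
  simp only [pvStepA]
  split
  · split
    · simp
    · exact pvChainA_length l x _
  · rfl

theorem pvStepA_vec (sc l : List String) (x : Nat) (h1 : l.getD x "" ∈ sc) (h2 : l.getD x "" = "vec") :
    pvStepA sc l x = (l.set x "\\vec{").set (x+1) ((l.set x "\\vec{").getD (x+1) "" ++ "}") := by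
  simp only [pvStepA]
  rw [if_pos (by simpa using h1), if_pos (by simpa using h2)]

theorem pvStepA_nonvec (sc l : List String) (x : Nat) (h : ¬ (l.getD x "" ∈ sc ∧ l.getD x "" = "vec")) :
    (pvStepA sc l x)[x+1]? = l[x+1]? := by
  simp only [pvStepA]
  split
  · split
    · exact absurd ⟨by rename_i hc _; simpa using hc, by rename_i hv; simpa using hv⟩ h
    · exact pvChainA_getElem? l x _ (x+1) (by omega)
  · rfl

-- arithmetic of the "vec"-run length
theorem pvRun_zero (wl : List String) : pvRun wl 0 = 0 := by simp [pvRun]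

theorem pvRun_succ (wl : List String) (k : Nat) (hk : k < wl.length) :
    pvRun wl (k+1) = if wl.getD k "" = "vec" then pvRun wl k + 1 else 0 := by
  have h1 : wl.take (k+1) = wl.take k ++ [wl.getD k ""] := by
    rw [List.getD_eq_getElem wl "" hk, List.take_add_one, List.getElem?_eq_getElem hk]
    rfl
  simp only [pvRun, h1, List.reverse_append, List.reverse_cons, List.reverse_nil,
    List.nil_append, List.cons_append, List.takeWhile_cons, beq_iff_eq]
  by_cases hc : wl[k]?.getD "" = "vec" <;> simp [hc, Nat.add_comm]

theorem pvRun_le (wl : List String) (k : Nat) : pvRun wl k ≤ k := by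
  calc ((wl.take k).reverse.takeWhile (fun s => s == "vec")).length
      ≤ (wl.take k).reverse.length := (List.takeWhile_sublist _).length_le
    _ = (wl.take k).length := List.length_reverse
    _ ≤ k := by simp [List.length_take]

theorem pvRun_cons (h : String) (t : List String) (j : Nat) (hj : j ≤ t.length) :
    pvRun (h::t) (j+1) = if h = "vec" ∧ pvRun t j = j then j + 1 else pvRun t j := by
  have hA : ((t.take j).reverse).length = j := by
    simp [List.length_take, Nat.min_eq_left hj]
  simp only [pvRun, List.take_succ_cons, List.reverse_cons, List.takeWhile_append, hA]
  by_cases hr : (((t.take j).reverse).takeWhile (fun s => s == "vec")).length = j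
  · rw [if_pos hr]
    by_cases hv : h = "vec"
    · rw [if_pos ⟨hv, hr⟩]
      simp [hv, hA]
    · rw [if_neg (by rintro ⟨hv', _⟩; exact hv hv')]
      simp [hv, hA, hr]
  · rw [if_neg hr, if_neg (by rintro ⟨_, h2⟩; exact hr h2)]

-- shadow-flag transfer across the head of the list
theorem pvShadow_zero (sc wl : List String) : pvShadowB sc wl 0 = false := by
  simp [pvShadowB, pvRun_zero]

theorem pvShadow_cons (sc : List String) (h : String) (t : List String) (j : Nat)
    (hj : j ≤ t.length) (hh : sc.contains "vec" = true → h ≠ "vec") :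
    pvShadowB sc (h::t) (j+1) = pvShadowB sc t j := by
  simp only [pvShadowB]
  by_cases hc : sc.contains "vec" = true
  · rw [pvRun_cons h t j hj, if_neg (by rintro ⟨hv, _⟩; exact hh hc hv)]
  · have hc0 : (decide ("vec" ∈ sc)) = false := by simpa using Bool.eq_false_iff.mpr hc
    simp [hc0]

theorem pvShadow_cons2 (sc : List String) (y : String) (t' : List String) (j : Nat)
    (hj : j ≤ t'.length) :
    pvShadowB sc ("vec"::y::t') (j+2) = pvShadowB sc t' j := by
  simp only [pvShadowB]
  by_cases hc : sc.contains "vec" = true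
  · have h1 : pvRun (y::t') (j+1) = if y = "vec" ∧ pvRun t' j = j then j + 1 else pvRun t' j :=
      pvRun_cons y t' j hj
    have h2 : pvRun ("vec"::y::t') (j+2) =
        if ("vec" : String) = "vec" ∧ pvRun (y::t') (j+1) = j+1 then j + 2 else pvRun (y::t') (j+1) :=
      pvRun_cons "vec" (y::t') (j+1) (by simpa using Nat.succ_le_succ hj)
    have hle : pvRun t' j ≤ j := pvRun_le t' j
    by_cases hy : y = "vec" ∧ pvRun t' j = j
    · rw [h1, if_pos hy] at h2
      rw [h2, if_pos ⟨rfl, rfl⟩]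
      have : (j + 2) % 2 = pvRun t' j % 2 := by omega
      rw [this]
    · rw [h1, if_neg hy] at h2
      rw [h2, if_neg (by rintro ⟨_, hx⟩; omega)]
  · have hc0 : (decide ("vec" ∈ sc)) = false := by simpa using Bool.eq_false_iff.mpr hc
    simp [hc0]

theorem pvConvert_cons (sc : List String) (h : String) (rest : List String) :
    pvConvert sc (h::rest) =
      if sc.contains h then
        if h == "vec" then
          (match rest with
            | [] => ["\\vec{"]
            | y :: rest' => "\\vec{" :: (y ++ "}") :: pvConvert sc rest')
        else
          (match pvLatexTable.get? h with
            | some r => r :: pvConvert sc rest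
            | none => h :: pvConvert sc rest)
      else h :: pvConvert sc rest := by
  cases rest <;> rfl

-- pointwise value of B's recursion
theorem pvConvert_length (sc : List String) : ∀ wl : List String,
    (pvConvert sc wl).length = wl.length := by
  intro wl
  induction wl using pvConvert.induct sc with
  | case1 => rfl
  | case2 a hb hv =>
    have hb' : a ∈ sc := by simpa using hb
    simp [pvConvert, hb', hv]
  | case3 a hb hv y rest' ih =>
    have hb' : a ∈ sc := by simpa using hb
    simp [pvConvert, hb', hv, ih]
  | case4 a rest hb hv r hm ih =>
    have hb' : a ∈ sc := by simpa using hb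
    simp [pvConvert_cons, hb', hv, hm, ih]
  | case5 a rest hb hv hm ih =>
    have hb' : a ∈ sc := by simpa using hb
    simp [pvConvert_cons, hb', hv, hm, ih]
  | case6 a rest hb ih =>
    have hb' : a ∉ sc := by simpa using hb
    simp [pvConvert_cons, hb', ih]

theorem pvConvert_getElem? (sc : List String) : ∀ (wl : List String) (j : Nat), j < wl.length →
    (pvConvert sc wl)[j]? = some (pvOut sc wl j) := by
  intro wl
  induction wl using pvConvert.induct sc with
  | case1 => intro j hj; simp at hj
  | case2 a hb hv =>
    intro j hj
    have hj0 : j = 0 := by simpa using hj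
    subst hj0
    have ha : a = "vec" := by simpa using hv
    subst ha
    have hb' : ("vec" : String) ∈ sc := by simpa using hb
    simp [pvConvert, hb', pvOut, pvShadow_zero]
  | case3 a hb hv y rest' ih =>
    intro j hj
    have ha : a = "vec" := by simpa using hv
    subst ha
    have hb' : ("vec" : String) ∈ sc := by simpa using hb
    have hconv : pvConvert sc ("vec"::y::rest') = "\\vec{" :: (y ++ "}") :: pvConvert sc rest' := by
      simp [pvConvert, hb']
    rw [hconv]
    match j, hj with
    | 0, _ => simp [pvOut, pvShadow_zero, hb']
    | 1, _ =>
      have hsh : pvShadowB sc ("vec"::y::rest') 1 = true := by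
        simp [pvShadowB, pvRun, List.take_succ_cons, hb']
      simp [pvOut, hsh]
    | (j+2), hj =>
      have hlen : j < rest'.length := by
        have := hj
        simp only [List.length_cons] at this
        omega
      have hout : pvOut sc ("vec"::y::rest') (j+2) = pvOut sc rest' j := by
        simp only [pvOut, pvShadow_cons2 sc y rest' j (le_of_lt hlen), List.getD_cons_succ]
      simp only [List.getElem?_cons_succ]
      rw [ih j hlen, hout]
  | case4 a rest hb hv r hm ih =>
    intro j hj
    have hb' : a ∈ sc := by simpa using hb
    have hconv : pvConvert sc (a::rest) = r :: pvConvert sc rest := by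
      simp [pvConvert_cons, hb', hv, hm]
    rw [hconv]
    match j, hj with
    | 0, _ => simp [pvOut, pvShadow_zero, hb', hv, hm]
    | (j+1), hj =>
      have hlen : j < rest.length := by simpa using hj
      have hout : pvOut sc (a::rest) (j+1) = pvOut sc rest j := by
        simp only [pvOut, List.getD_cons_succ,
          pvShadow_cons sc a rest j (le_of_lt hlen) (fun _ hv' => hv (by simp [hv']))]
      simp only [List.getElem?_cons_succ]
      rw [ih j hlen, hout]
  | case5 a rest hb hv hm ih =>
    intro j hj
    have hb' : a ∈ sc := by simpa using hb
    have hconv : pvConvert sc (a::rest) = a :: pvConvert sc rest := by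
      simp [pvConvert_cons, hb', hv, hm]
    rw [hconv]
    match j, hj with
    | 0, _ => simp [pvOut, pvShadow_zero, hb', hv, hm]
    | (j+1), hj =>
      have hlen : j < rest.length := by simpa using hj
      have hout : pvOut sc (a::rest) (j+1) = pvOut sc rest j := by
        simp only [pvOut, List.getD_cons_succ,
          pvShadow_cons sc a rest j (le_of_lt hlen) (fun _ hv' => hv (by simp [hv']))]
      simp only [List.getElem?_cons_succ]
      rw [ih j hlen, hout]
  | case6 a rest hb ih =>
    intro j hj
    have hb' : a ∉ sc := by simpa using hb
    have hconv : pvConvert sc (a::rest) = a :: pvConvert sc rest := by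
      simp [pvConvert_cons, hb']
    rw [hconv]
    match j, hj with
    | 0, _ => simp [pvOut, pvShadow_zero, hb']
    | (j+1), hj =>
      have hlen : j < rest.length := by simpa using hj
      have hout : pvOut sc (a::rest) (j+1) = pvOut sc rest j := by
        simp only [pvOut, List.getD_cons_succ,
          pvShadow_cons sc a rest j (le_of_lt hlen) (fun hcv hav => hb (hav ▸ hcv))]
      simp only [List.getElem?_cons_succ]
      rw [ih j hlen, hout]

-- state of A's loop after the first k iterations: the length is unchanged, positions ≥ k
-- still hold their original token, except that position k already carries the "}" appended by
-- a processed "vec" at position k-1 (pvShadowB)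
theorem pvFoldState (sc : List String) (wl : List String) :
    ∀ k, k ≤ wl.length →
      ((List.range k).foldl (pvStepA sc) wl).length = wl.length ∧
      ∀ j, k ≤ j → j < wl.length →
        ((List.range k).foldl (pvStepA sc) wl)[j]? =
          some (wl.getD j "" ++ (if j = k ∧ pvShadowB sc wl j = true then "}" else "")) := by
  intro k
  induction k with
  | zero =>
    intro _
    refine ⟨rfl, fun j _ hj => ?_⟩
    rw [if_neg (by rintro ⟨h0, hs⟩; subst h0; simp [pvShadowB, pvRun_zero] at hs)]
    simp [List.getElem?_eq_getElem hj]
  | succ k ih =>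
    intro hk1
    have hklt : k < wl.length := by omega
    obtain ⟨ihlen, ihval⟩ := ih (by omega)
    set P := (List.range k).foldl (pvStepA sc) wl with hP
    have hstep : (List.range (k+1)).foldl (pvStepA sc) wl = pvStepA sc P k := by
      rw [List.range_succ, List.foldl_append]; rfl
    have hPk : P[k]? = some (wl.getD k "" ++ (if pvShadowB sc wl k = true then "}" else "")) := by
      have h := ihval k (le_refl k) hklt
      simpa only [true_and] using h
    have hPgetD : P.getD k "" = wl.getD k "" ++ (if pvShadowB sc wl k = true then "}" else "") := by
      rw [List.getD_eq_getElem?_getD, hPk, Option.getD_some]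
    have hlen' : (pvStepA sc P k).length = wl.length := by rw [pvStepA_length, ihlen]
    refine ⟨hstep ▸ hlen', fun j hj hjlen => ?_⟩
    rw [hstep]
    by_cases hcase : P.getD k "" ∈ sc ∧ P.getD k "" = "vec"
    · -- the step at k is the "vec" branch: it appends "}" to position k+1
      have hsh : pvShadowB sc wl k = false := by
        by_contra hb
        rw [if_pos (by simpa using eq_true_of_ne_false hb)] at hPgetD
        exact pvAppend_brace_ne_vec _ (hPgetD ▸ hcase.2)
      have hwk : wl.getD k "" = "vec" := by
        rw [hPgetD, hsh, if_neg (by simp), String.append_empty] at hcase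
        exact hcase.2
      have hvecsc : sc.contains "vec" = true := by
        have h := hcase.1
        rw [hPgetD, hsh, if_neg (by simp), String.append_empty, hwk] at h
        simpa using h
      have hstepeq := pvStepA_vec sc P k hcase.1 hcase.2
      have hrun : pvRun wl (k+1) % 2 = 1 := by
        have hshk : pvRun wl k % 2 = 0 := by
          simp only [pvShadowB, Bool.and_eq_false_iff] at hsh
          rcases hsh with h | h
          · rw [hvecsc] at h; exact absurd h (by simp)
          · simp only [beq_eq_false_iff_ne] at h; omega
        rw [pvRun_succ wl k hklt, if_pos hwk]; omega
      have hsh1 : pvShadowB sc wl (k+1) = true := by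
        simp only [pvShadowB, Bool.and_eq_true, beq_iff_eq]
        exact ⟨hvecsc, hrun⟩
      rcases Nat.lt_or_ge j (k+2) with hj2 | hj2
      · -- j = k+1
        have hjk : j = k + 1 := by omega
        subst hjk
        rw [hstepeq]
        have hlt : k + 1 < ((P.set k "\\vec{").length) := by simpa [ihlen] using hjlen
        rw [List.getElem?_set_self hlt]
        have hv : (P.set k "\\vec{").getD (k+1) "" = wl.getD (k+1) "" := by
          rw [List.getD_eq_getElem?_getD, List.getElem?_set_ne (by omega)]
          have h := ihval (k+1) (by omega) hjlen
          rw [if_neg (by rintro ⟨h', _⟩; omega)] at h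
          rw [h, Option.getD_some, String.append_empty]
        rw [hv, if_pos ⟨rfl, hsh1⟩]
      · -- j ≥ k+2 : untouched by the step
        rw [pvStepA_getElem? sc P k j (by omega) (by omega)]
        have h := ihval j (by omega) hjlen
        rw [if_neg (by rintro ⟨h', _⟩; omega)] at h
        rw [h, if_neg (by rintro ⟨h', _⟩; omega)]
    · -- not the "vec" branch: positions ≥ k+1 untouched
      have hsh1 : pvShadowB sc wl (k+1) = false := by
        by_contra hb
        have hb' : sc.contains "vec" = true ∧ pvRun wl (k+1) % 2 = 1 := by
          have h := eq_true_of_ne_false hb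
          simpa [pvShadowB] using h
        have hwk : wl.getD k "" = "vec" := by
          by_contra hne
          rw [pvRun_succ wl k hklt, if_neg hne] at hb'
          omega
        have hrk : pvRun wl k % 2 = 0 := by
          have h := hb'.2
          rw [pvRun_succ wl k hklt, if_pos hwk] at h
          omega
        have hshk : pvShadowB sc wl k = false := by
          simp [pvShadowB, hrk]
        rw [if_neg (by simp [hshk]), String.append_empty] at hPgetD
        exact hcase ⟨hPgetD ▸ hwk ▸ (by simpa using hb'.1), hPgetD ▸ hwk⟩
      rcases Nat.lt_or_ge j (k+2) with hj2 | hj2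
      · have hjk : j = k + 1 := by omega
        subst hjk
        rw [pvStepA_nonvec sc P k hcase]
        have h := ihval (k+1) (by omega) hjlen
        rw [if_neg (by rintro ⟨h', _⟩; omega)] at h
        rw [h, if_neg (by simp [hsh1])]
      · rw [pvStepA_getElem? sc P k j (by omega) (by omega)]
        have h := ihval j (by omega) hjlen
        rw [if_neg (by rintro ⟨h', _⟩; omega)] at h
        rw [h, if_neg (by rintro ⟨h', _⟩; omega)]

-- position j is final after step j has run
theorem pvFoldFinal (sc : List String) (wl : List String) (j : Nat) :
    ∀ n, j + 1 ≤ n →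
      ((List.range n).foldl (pvStepA sc) wl)[j]? = ((List.range (j+1)).foldl (pvStepA sc) wl)[j]? := by
  intro n hn
  induction n, hn using Nat.le_induction with
  | base => rfl
  | succ n hn ih =>
    rw [List.range_succ, List.foldl_append]
    simp only [List.foldl_cons, List.foldl_nil]
    rw [pvStepA_getElem? sc _ n j (by omega) (by omega), ih]

theorem pvFoldA_length (sc : List String) (wl : List String) :
    (handleSpecialChars wl sc).length = wl.length :=
  (pvFoldState sc wl wl.length (le_refl _)).1

-- final value of A's loop at position j, assuming no buggy token fires (¬ D_)
theorem pvFoldA_getElem? (sc wl : List String) (hD : ¬ D_handleSpecialChars wl sc)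
    (j : Nat) (hj : j < wl.length) :
    (handleSpecialChars wl sc)[j]? = some (pvOut sc wl j) := by
  show ((List.range wl.length).foldl (pvStepA sc) wl)[j]? = _
  rw [pvFoldFinal sc wl j wl.length (by omega), List.range_succ, List.foldl_append]
  simp only [List.foldl_cons, List.foldl_nil]
  set P := (List.range j).foldl (pvStepA sc) wl with hPdef
  obtain ⟨hPlen, hPval⟩ := pvFoldState sc wl j (by omega)
  have hPj := hPval j (le_refl j) hj
  by_cases hsh : pvShadowB sc wl j = true
  · -- the token at j was already mangled to w ++ "}" : the step is a no-op there
    rw [if_pos ⟨rfl, hsh⟩] at hPj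
    have htok : P.getD j "" = wl.getD j "" ++ "}" := by
      rw [List.getD_eq_getElem?_getD, hPj, Option.getD_some]
    have hstep : (pvStepA sc P j)[j]? = P[j]? := by
      simp only [pvStepA]
      rw [htok]
      split
      · rw [if_neg (by simpa using pvAppend_brace_ne_vec (wl.getD j ""))]
        rw [pvChainA_brace]
      · rfl
    rw [hstep, hPj]
    simp [pvOut, hsh]
  · -- the token at j is still the original w
    rw [if_neg (by rintro ⟨_, hs⟩; exact hsh hs)] at hPj
    rw [String.append_empty] at hPj
    have htok : P.getD j "" = wl.getD j "" := by
      rw [List.getD_eq_getElem?_getD, hPj, Option.getD_some]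
    have hg : wl[j]?.getD "" = wl.getD j "" := by rw [List.getD_eq_getElem?_getD]
    have hjP : j < P.length := by rw [← hPdef] at hPlen; omega
    by_cases hin : wl.getD j "" ∈ sc
    · by_cases hveq : wl.getD j "" = "vec"
      · -- "vec": the step writes "\\vec{" at j (and appends to j+1)
        rw [pvStepA_vec sc P j (htok ▸ hin) (htok.trans hveq)]
        rw [List.getElem?_set_ne (by omega), List.getElem?_set_self hjP]
        have hin' : wl[j]?.getD "" ∈ sc := by rw [hg]; exact hin
        have hveq' : wl[j]?.getD "" = "vec" := by rw [hg]; exact hveq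
        simp [pvOut, hsh, hveq', hveq ▸ hin]
      · by_cases hbad : wl.getD j "" ∈ pvBad
        · exact absurd ⟨j, hj, by simpa [pvBad] using hbad, hin, Bool.eq_false_iff.mpr hsh⟩ hD
        · -- ordinary token: the chain is the dict lookup
          have hstep : pvStepA sc P j =
              (match pvLatexTable.get? (wl.getD j "") with
                | some r => P.set j r
                | none => P) := by
            simp only [pvStepA]
            rw [htok, if_pos (by simpa using hin), if_neg (by simpa using hveq)]
            exact pvChain_eq_table P j _ hbad
          rw [hstep]
          cases hm : pvLatexTable.get? (wl.getD j "") with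
          | some r =>
            rw [List.getElem?_set_self hjP]
            have hin' : wl[j]?.getD "" ∈ sc := by rw [hg]; exact hin
            have hveq' : ¬ wl[j]?.getD "" = "vec" := by rw [hg]; exact hveq
            have hm' : pvLatexTable.get? (wl[j]?.getD "") = some r := by rw [hg]; exact hm
            simp [pvOut, hsh, hin', hveq', hm']
          | none =>
            rw [hPj]
            have hin' : wl[j]?.getD "" ∈ sc := by rw [hg]; exact hin
            have hveq' : ¬ wl[j]?.getD "" = "vec" := by rw [hg]; exact hveq
            have hm' : pvLatexTable.get? (wl[j]?.getD "") = none := by rw [hg]; exact hm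
            simp [pvOut, hsh, hin', hveq', hm']
    · -- token not special: the step is a no-op
      have hstep : pvStepA sc P j = P := by
        simp only [pvStepA]
        rw [htok, if_neg (by simpa using hin)]
      rw [hstep, hPj]
      have hin' : wl[j]?.getD "" ∉ sc := by rw [hg]; exact hin
      simp [pvOut, hsh, hin']

-- ===== VERDICT (by name: the statement is the Claim_ definition above) =====
theorem handleSpecialChars_spec : Claim_unchanged_handleSpecialChars := by
  intro wl sc _ _ hD
  show handleSpecialChars wl sc = handleSpecialChars_alt wl sc
  apply List.ext_getElem?
  intro j
  by_cases hj : j < wl.length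
  · rw [pvFoldA_getElem? sc wl hD j hj]
    exact (pvConvert_getElem? sc wl j hj).symm
  · rw [List.getElem?_eq_none (by rw [pvFoldA_length]; omega),
        List.getElem?_eq_none (by
          show (pvConvert sc wl).length ≤ j
          rw [pvConvert_length]; omega)]

theorem handleSpecialChars_changed : Claim_changed_handleSpecialChars := by
  unfold Claim_changed_handleSpecialChars; decide

theorem handleSpecialChars_tight : Claim_exact_handleSpecialChars := by
  intro wl sc _ _ hd heq
  obtain ⟨x, hx, hbad, hsc, hsh⟩ := hd
  have hbad' : wl.getD x "" ∈ pvBad := hbad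
  obtain ⟨hAlen, hAval⟩ := pvFoldState sc wl x (by omega)
  set PA := (List.range x).foldl (pvStepA sc) wl with hPAdef
  have hPAx : PA[x]? = some (wl.getD x "") := by
    have h := hAval x (le_refl x) hx
    rw [if_neg (by rintro ⟨_, hs⟩; rw [hsh] at hs; exact absurd hs (by simp)),
      String.append_empty] at h
    exact h
  have hPA : PA.getD x "" = wl.getD x "" := by
    rw [List.getD_eq_getElem?_getD, hPAx, Option.getD_some]
  -- A's final value at x is the untouched token
  have eA : (handleSpecialChars wl sc)[x]? = some (wl.getD x "") := by
    show ((List.range wl.length).foldl (pvStepA sc) wl)[x]? = _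
    rw [pvFoldFinal sc wl x wl.length (by omega), List.range_succ, List.foldl_append]
    simp only [List.foldl_cons, List.foldl_nil]
    rw [← hPAdef]
    have hstep : pvStepA sc PA x = PA := by
      simp only [pvStepA]
      rw [if_pos (by rw [hPA]; simpa using hsc),
        if_neg (by rw [hPA]; simpa using pvBad_ne_vec _ hbad')]
      exact pvChainA_bad PA x _ (hPA ▸ hbad')
    rw [hstep, hPAx]
  -- B's final value at x is the table's replacement
  obtain ⟨rep, hget, hne⟩ : ∃ rep, pvLatexTable.get? (wl.getD x "") = some rep ∧ wl.getD x "" ≠ rep := by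
    simp only [pvBad, List.mem_cons, List.not_mem_nil, or_false] at hbad'
    rcases hbad' with h | h | h | h | h | h <;> rw [h] <;> exact ⟨_, rfl, by decide⟩
  have eB : (handleSpecialChars_alt wl sc)[x]? = some rep := by
    show (pvConvert sc wl)[x]? = _
    rw [pvConvert_getElem? sc wl x hx]
    have hg : wl[x]?.getD "" = wl.getD x "" := by rw [List.getD_eq_getElem?_getD]
    have hin' : wl[x]?.getD "" ∈ sc := by rw [hg]; exact hsc
    have hveq' : ¬ wl[x]?.getD "" = "vec" := by rw [hg]; exact pvBad_ne_vec _ hbad'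
    have hm' : pvLatexTable.get? (wl[x]?.getD "") = some rep := by rw [hg]; exact hget
    simp [pvOut, hsh, hin', hveq', hm']
  rw [heq, eB] at eA
  exact hne (Option.some.inj eA).symm
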